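-- pv_equiv track=rewrite | github.com/The-Martix/bioinfo-tools | seqtools/__init__.py | find_aligned_residue
-- ===== SOURCE A (Python) =====
-- def find_aligned_residue(ref_seq, alt_seq, residue_number):
--     """
--     Encuentra con qué aminoácido/gap de la secuencia alternativa se alinea un residuo dado de la referencia.
--
--     Parameters:
--     - ref_seq (str): secuencia de referencia con gaps
--     - alt_seq (str): secuencia alternativa con gaps (alineada a la referencia)
--     - residue_number (int): número de residuo en la referencia (sin contar gaps)
--
--     Returns:
--     - tuple: (residuo_referencia, residuo_alternativa, posicion_alineada)
--     """
--     assert len(ref_seq) == len(alt_seq), "Las secuencias deben tener la misma longitud"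
--
--     count = 0  # contador de residuos sin gap en referencia
--     for i, res in enumerate(ref_seq):
--         if res != "-":
--             count += 1
--             if count == residue_number:
--                 return res, alt_seq[i], i+1  # residuo ref, residuo alt, posición en alineamiento
--
--     return None  # si no se encuentra
-- ===== SOURCE B (Python) =====
-- def find_aligned_residue(ref_seq, alt_seq, residue_number):
--     assert len(ref_seq) == len(alt_seq), "Las secuencias deben tener la misma longitud"
--     positions = [(i, res) for i, res in enumerate(ref_seq) if res != "-"]
--     if 1 <= residue_number <= len(positions):
--         i, res = positions[residue_number - 1]
--         return res, alt_seq[i], i + 1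
--     return None
-- ===== Notes on version B (the rewrite author's own statement) =====
-- stated objective: alternative
-- what changed: Replaces the counting scan with early exit by precomputing the list of (index, residue) pairs of non-gap positions and doing a direct bounds-checked lookup at residue_number-1.
import Mathlib
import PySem

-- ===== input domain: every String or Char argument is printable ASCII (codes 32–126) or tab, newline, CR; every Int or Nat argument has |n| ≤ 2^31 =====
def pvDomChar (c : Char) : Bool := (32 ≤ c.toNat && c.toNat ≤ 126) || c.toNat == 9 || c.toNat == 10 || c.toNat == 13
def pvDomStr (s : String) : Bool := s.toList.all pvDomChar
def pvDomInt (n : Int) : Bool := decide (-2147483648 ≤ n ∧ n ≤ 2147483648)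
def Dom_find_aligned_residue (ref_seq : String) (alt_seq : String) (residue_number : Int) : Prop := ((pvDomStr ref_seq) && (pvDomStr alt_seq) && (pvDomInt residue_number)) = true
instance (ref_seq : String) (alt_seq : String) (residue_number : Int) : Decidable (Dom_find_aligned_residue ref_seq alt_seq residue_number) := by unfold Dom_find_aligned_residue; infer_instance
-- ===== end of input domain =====

-- B replaces A's counting scan (early exit when the count reaches residue_number) by
-- precomputing the list of (index, residue) pairs of non-gap positions and doing one
-- bounds-checked direct lookup; objective: alternative decomposition, same cost.

-- ===== PORT A =====
-- the body of A's 'for i, res in enumerate(ref_seq)' loop carrying the running count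
def findAux (rn : Int) (alt : String) : List Char → Nat → Int → Option (String × String × Int)
  | [], _, _ => none
  | c :: rest, i, count =>
    if c ≠ '-' then
      if count + 1 = rn then
        some (String.ofList [c], ((PySem.Str.pyGet? alt (i : Int)).map (fun ch => String.ofList [ch])).getD "", (i : Int) + 1)
      else findAux rn alt rest (i + 1) (count + 1)
    else findAux rn alt rest (i + 1) count

def find_aligned_residue (ref_seq : String) (alt_seq : String) (residue_number : Int) : Option (String × String × Int) :=
  findAux residue_number alt_seq ref_seq.toList 0 0

-- ===== PORT B =====
-- the comprehension [(i, res) for i, res in enumerate(ref_seq) if res != "-"]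
def posPairs : List Char → Nat → List (Nat × Char)
  | [], _ => []
  | c :: rest, i => if c ≠ '-' then (i, c) :: posPairs rest (i + 1) else posPairs rest (i + 1)

def find_aligned_residue_alt (ref_seq : String) (alt_seq : String) (residue_number : Int) : Option (String × String × Int) :=
  let positions := posPairs ref_seq.toList 0
  if 1 ≤ residue_number ∧ residue_number ≤ (positions.length : Int) then
    match positions[(residue_number - 1).toNat]? with
    | some p => some (String.ofList [p.2], ((PySem.Str.pyGet? alt_seq (p.1 : Int)).map (fun ch => String.ofList [ch])).getD "", (p.1 : Int) + 1)
    | none => none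
  else none

-- ===== PRECONDITION & SPEC =====
-- Pre_ excludes exactly the inputs on which A's assert raises (unequal lengths)
def Pre_find_aligned_residue (ref_seq : String) (alt_seq : String) (residue_number : Int) : Prop :=
  ref_seq.toList.length = alt_seq.toList.length
instance (ref_seq : String) (alt_seq : String) (residue_number : Int) : Decidable (Pre_find_aligned_residue ref_seq alt_seq residue_number) := by unfold Pre_find_aligned_residue; infer_instance
def pvWitness_find_aligned_residue : String × String × Int := ("A-CD", "XY-Z", 2)

def Spec_find_aligned_residue (ref_seq : String) (alt_seq : String) (residue_number : Int) (out : Option (String × String × Int)) : Prop := out = find_aligned_residue_alt ref_seq alt_seq residue_number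
instance (ref_seq : String) (alt_seq : String) (residue_number : Int) (out : Option (String × String × Int)) : Decidable (Spec_find_aligned_residue ref_seq alt_seq residue_number out) := by unfold Spec_find_aligned_residue; infer_instance

-- ===== CLAIM (what is proved, stated in full; the proofs are below) =====
def Claim_equal_find_aligned_residue : Prop := ∀ (ref_seq : String) (alt_seq : String) (residue_number : Int), Dom_find_aligned_residue ref_seq alt_seq residue_number → Pre_find_aligned_residue ref_seq alt_seq residue_number → Spec_find_aligned_residue ref_seq alt_seq residue_number (find_aligned_residue ref_seq alt_seq residue_number)

-- ===== LEMMAS AND PROOFS =====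

-- A's scan starting with running count cnt equals a direct lookup at residue rn - cnt
-- into the precomputed non-gap position list (in fact unconditionally).
theorem findAux_eq_lookup (rn : Int) (alt : String) :
    ∀ (l : List Char) (i : Nat) (cnt : Int),
      findAux rn alt l i cnt =
        (if 1 ≤ rn - cnt ∧ rn - cnt ≤ ((posPairs l i).length : Int) then
          match (posPairs l i)[(rn - cnt - 1).toNat]? with
          | some p => some (String.ofList [p.2], ((PySem.Str.pyGet? alt (p.1 : Int)).map (fun ch => String.ofList [ch])).getD "", (p.1 : Int) + 1)
          | none => none
        else none) := by
  intro l
  induction l with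
  | nil =>
    intro i cnt
    simp only [findAux, posPairs, List.length_nil]
    rw [if_neg]; omega
  | cons c rest ih =>
    intro i cnt
    by_cases hc : c = '-'
    · simp only [findAux, posPairs, hc]
      simp only [if_neg (by simp : ¬('-' ≠ '-'))]
      exact ih (i + 1) cnt
    · simp only [findAux, posPairs, if_pos (by simpa using hc : c ≠ '-')]
      by_cases hrn : cnt + 1 = rn
      · rw [if_pos hrn,
          if_pos (⟨by omega, by simp only [List.length_cons]; push_cast; omega⟩ :
            1 ≤ rn - cnt ∧ rn - cnt ≤ (((i, c) :: posPairs rest (i + 1)).length : Int))]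
        have h1 : (rn - cnt - 1).toNat = 0 := by omega
        rw [h1]
        simp
      · rw [if_neg hrn, ih (i + 1) (cnt + 1)]
        by_cases h2 : 1 ≤ rn - (cnt + 1) ∧ rn - (cnt + 1) ≤ ((posPairs rest (i + 1)).length : Int)
        · rw [if_pos h2, if_pos (by simp only [List.length_cons]; push_cast; omega)]
          have hidx : (rn - cnt - 1).toNat = (rn - (cnt + 1) - 1).toNat + 1 := by omega
          rw [hidx, List.getElem?_cons_succ]
        · rw [if_neg h2, if_neg (by simp only [List.length_cons]; push_cast at h2 ⊢; omega)]

-- ===== VERDICT (by name: the statement is the Claim_ definition above) =====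
theorem find_aligned_residue_spec : Claim_equal_find_aligned_residue := by
  intro ref_seq alt_seq residue_number _ _
  unfold Spec_find_aligned_residue find_aligned_residue find_aligned_residue_alt
  rw [findAux_eq_lookup]
  simp
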